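-- pv_equiv track=rewrite | github.com/markovluka-prog/My-Projects | LIT gpt/Root_model.py | find_the_same_letters
-- ===== SOURCE A (Python) =====
-- def find_the_same_letters(word_one, word_two):
-- 	word_one = list(word_one)
-- 	word_two = list(word_two)
-- 	if len(word_one) > len(word_two):
-- 		the_smallest = word_two
-- 		the_biggest = word_one
-- 	else:
-- 		the_smallest = word_one
-- 		the_biggest = word_two
--
-- 	the_same_letters_zero = []
-- 	the_same_letters_one = []
-- 	used_big = set()
-- 	for idx_small, i in enumerate(the_smallest):
-- 		for idx_big, b in enumerate(the_biggest):
-- 			if i == b and idx_big not in used_big: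
-- 				used_big.add(idx_big)
-- 				the_same_letters_zero.append(idx_big)
-- 				the_same_letters_one.append(idx_small)
-- 				break
-- 	return [the_same_letters_zero, the_same_letters_one]
-- ===== SOURCE B (Python) =====
-- def find_the_same_letters(word_one, word_two):
-- 	if len(word_one) > len(word_two):
-- 		small, big = word_two, word_one
-- 	else:
-- 		small, big = word_one, word_two
-- 	pos = {}
-- 	for j, b in enumerate(big):
-- 		pos.setdefault(b, []).append(j)
-- 	nxt = {}
-- 	zeros = []
-- 	ones = []
-- 	for i, c in enumerate(small):
-- 		k = nxt.get(c, 0)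
-- 		lst = pos.get(c, [])
-- 		if k < len(lst):
-- 			zeros.append(lst[k])
-- 			ones.append(i)
-- 			nxt[c] = k + 1
-- 	return [zeros, ones]
-- ===== Notes on version B (the rewrite author's own statement) =====
-- stated objective: faster
-- what changed: Replaces the inner linear scan of the longer word (with a used-index set) by a precomputed per-character occurrence-index dict with advancing per-character pointers, so each letter of the shorter word is matched in O(1).
import Mathlib
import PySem

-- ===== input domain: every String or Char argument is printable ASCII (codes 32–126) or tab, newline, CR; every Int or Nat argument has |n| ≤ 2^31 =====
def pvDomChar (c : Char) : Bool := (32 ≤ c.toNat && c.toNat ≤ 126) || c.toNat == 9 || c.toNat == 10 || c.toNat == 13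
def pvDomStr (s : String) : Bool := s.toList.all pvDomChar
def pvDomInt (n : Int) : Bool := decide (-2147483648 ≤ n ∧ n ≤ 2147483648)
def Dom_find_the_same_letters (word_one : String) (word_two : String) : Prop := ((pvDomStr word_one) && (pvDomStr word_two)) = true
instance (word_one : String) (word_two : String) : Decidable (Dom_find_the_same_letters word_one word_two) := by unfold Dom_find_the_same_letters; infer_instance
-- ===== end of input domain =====

-- B replaces A's inner linear scan over the longer word (guarded by a used-index set) with a
-- per-character occurrence-index dict and advancing per-character pointers (objective: faster).

-- ===== PORT A =====
-- inner loop: first (idx_big, b) with b == i and idx_big not yet used (break on first hit)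
def pvA_scan (used : PySem.Set Int) (c : Char) : List (Int × Char) → Option Int
  | [] => none
  | p :: rest => if p.2 = c ∧ p.1 ∉ used then some p.1 else pvA_scan used c rest

-- one iteration of the outer 'for idx_small, i in enumerate(the_smallest)' loop;
-- state = (the_same_letters_zero, the_same_letters_one, used_big)
def pvA_step (bigE : List (Int × Char)) (st : List Int × List Int × PySem.Set Int)
    (p : Int × Char) : List Int × List Int × PySem.Set Int :=
  match pvA_scan st.2.2 p.2 bigE with
  | some j => (st.1 ++ [j], st.2.1 ++ [p.1], PySem.Set.add st.2.2 j)
  | none => st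

def find_the_same_letters (word_one : String) (word_two : String) : List (List Int) :=
  let one := word_one.toList
  let two := word_two.toList
  let the_smallest := if one.length > two.length then two else one
  let the_biggest := if one.length > two.length then one else two
  let st := (PySem.List.enumerate the_smallest).foldl
    (pvA_step (PySem.List.enumerate the_biggest)) ([], [], (PySem.Set.empty : PySem.Set Int))
  [st.1, st.2.1]

-- ===== PORT B =====
-- 'for j, b in enumerate(big): pos.setdefault(b, []).append(j)'
def pvB_build (bigE : List (Int × Char)) : PySem.Dict Char (List Int) :=
  bigE.foldl (fun d p => d.modify p.2 [] (· ++ [p.1])) PySem.Dict.empty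

-- one iteration of 'for i, c in enumerate(small)'; state = (zeros, ones, nxt).
-- lst[k] is ported as pyGetD lst k 0: exact here because the branch guard gives k < len(lst)
-- and the pointer k starts at 0 and is only ever incremented, so 0 ≤ k.
def pvB_step (pos : PySem.Dict Char (List Int)) (st : List Int × List Int × PySem.Dict Char Int)
    (p : Int × Char) : List Int × List Int × PySem.Dict Char Int :=
  let k := st.2.2.getD p.2 0
  let lst := pos.getD p.2 []
  if k < PySem.List.len lst then
    (st.1 ++ [PySem.List.pyGetD lst k 0], st.2.1 ++ [p.1], st.2.2.insert p.2 (k + 1))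
  else st

def find_the_same_letters_alt (word_one : String) (word_two : String) : List (List Int) :=
  let small := if PySem.Str.len word_one > PySem.Str.len word_two then word_two.toList else word_one.toList
  let big := if PySem.Str.len word_one > PySem.Str.len word_two then word_one.toList else word_two.toList
  let pos := pvB_build (PySem.List.enumerate big)
  let st := (PySem.List.enumerate small).foldl (pvB_step pos)
    ([], [], (PySem.Dict.empty : PySem.Dict Char Int))
  [st.1, st.2.1]

-- ===== PRECONDITION & SPEC =====
def Spec_find_the_same_letters (word_one : String) (word_two : String) (out : List (List Int)) : Prop := out = find_the_same_letters_alt word_one word_two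
instance (word_one : String) (word_two : String) (out : List (List Int)) : Decidable (Spec_find_the_same_letters word_one word_two out) := by unfold Spec_find_the_same_letters; infer_instance

-- ===== CLAIM (what is proved, stated in full; the proofs are below) =====
def Claim_equal_find_the_same_letters : Prop := ∀ (word_one : String) (word_two : String), Dom_find_the_same_letters word_one word_two → Spec_find_the_same_letters word_one word_two (find_the_same_letters word_one word_two)

-- ===== LEMMAS AND PROOFS =====

-- the indices of the longer word still available for character c
def pvRem (bigE : List (Int × Char)) (used : PySem.Set Int) (c : Char) : List Int :=
  (bigE.filter (fun p => decide (p.2 = c ∧ p.1 ∉ used))).map (·.1)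

lemma pvA_scan_eq (used : PySem.Set Int) (c : Char) (l : List (Int × Char)) :
    pvA_scan used c l = (pvRem l used c).head? := by
  induction l with
  | nil => rfl
  | cons p t ih =>
    by_cases h : p.2 = c ∧ p.1 ∉ used <;>
      simp [pvA_scan, pvRem, h] <;> simpa [pvRem] using ih

lemma pvB_build_getD (c : Char) : ∀ (l : List (Int × Char)) (d : PySem.Dict Char (List Int)),
    (l.foldl (fun d p => d.modify p.2 [] (· ++ [p.1])) d).getD c []
      = d.getD c [] ++ (l.filter (fun p => p.2 == c)).map (·.1) := by
  intro l
  induction l with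
  | nil => simp
  | cons p t ih =>
    intro d
    rw [List.foldl_cons, ih, List.filter_cons]
    by_cases h : c = p.2
    · subst h
      simp
    · have hb : (p.2 == c) = false := by
        simp only [beq_eq_false_iff_ne, ne_eq]
        exact fun hh => h hh.symm
      simp [PySem.Dict.getD_modify, h, hb]

lemma pvRem_empty (bigE : List (Int × Char)) (c : Char) :
    pvRem bigE PySem.Set.empty c = (bigE.filter (fun p => p.2 == c)).map (·.1) := by
  unfold pvRem
  congr 1
  apply List.filter_congr
  intro p _
  by_cases hp : p.2 = c <;> simp [PySem.Set.empty, hp]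

lemma mem_pvRem {bigE : List (Int × Char)} {used : PySem.Set Int} {c : Char} {x : Int} :
    x ∈ pvRem bigE used c ↔ ∃ p ∈ bigE, p.2 = c ∧ p.1 ∉ used ∧ p.1 = x := by
  simp [pvRem, List.mem_filter, and_assoc]

lemma pv_map_fst_filter_and (q : Int × Char → Bool) (r : Int → Bool) :
    ∀ l : List (Int × Char),
    (l.filter (fun p => q p && r p.1)).map (·.1) = ((l.filter q).map (·.1)).filter r := by
  intro l
  induction l with
  | nil => rfl
  | cons p t ih =>
    by_cases h1 : q p <;> by_cases h2 : r p.1 <;> simp [h1, h2, ih]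

lemma pvRem_add (bigE : List (Int × Char)) (used : PySem.Set Int) (j : Int) (c : Char) :
    pvRem bigE (PySem.Set.add used j) c = (pvRem bigE used c).filter (fun x => decide (x ≠ j)) := by
  have hfn : (fun p : Int × Char => decide (p.2 = c ∧ p.1 ∉ PySem.Set.add used j))
      = (fun p => decide (p.2 = c ∧ p.1 ∉ used) && decide (p.1 ≠ j)) := by
    funext p
    by_cases h1 : p.2 = c <;> by_cases h2 : p.1 ∈ used <;> by_cases h3 : p.1 = j <;>
      simp [PySem.Set.mem_add, h1, h2, h3]
  rw [pvRem, hfn]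
  exact pv_map_fst_filter_and (fun p => decide (p.2 = c ∧ p.1 ∉ used)) (fun x => decide (x ≠ j)) bigE

lemma pvRem_nodup {bigE : List (Int × Char)} (hn : (bigE.map (·.1)).Nodup)
    (used : PySem.Set Int) (c : Char) : (pvRem bigE used c).Nodup := by
  have hsub : (pvRem bigE used c).Sublist (bigE.map (·.1)) :=
    List.Sublist.map _ List.filter_sublist
  exact hn.sublist hsub

-- the simulation invariant between A's used-set and B's pointer dict
def pvInv (bigE : List (Int × Char)) (used : PySem.Set Int) (nxt : PySem.Dict Char Int) : Prop :=
  ∀ c : Char, 0 ≤ nxt.getD c 0 ∧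
    ((pvB_build bigE).getD c []).drop (nxt.getD c 0).toNat = pvRem bigE used c

lemma pvInv_init (bigE : List (Int × Char)) :
    pvInv bigE PySem.Set.empty (PySem.Dict.empty : PySem.Dict Char Int) := by
  intro c
  refine ⟨by simp [PySem.Dict.getD_empty], ?_⟩
  rw [pvRem_empty, pvB_build, pvB_build_getD c bigE PySem.Dict.empty]
  simp [PySem.Dict.getD_empty]

lemma pv_step_sim (bigE : List (Int × Char)) (hn : (bigE.map (·.1)).Nodup)
    (z o : List Int) (used : PySem.Set Int) (nxt : PySem.Dict Char Int) (p : Int × Char)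
    (hInv : pvInv bigE used nxt) :
    (pvA_step bigE (z, o, used) p).1 = (pvB_step (pvB_build bigE) (z, o, nxt) p).1 ∧
    (pvA_step bigE (z, o, used) p).2.1 = (pvB_step (pvB_build bigE) (z, o, nxt) p).2.1 ∧
    pvInv bigE (pvA_step bigE (z, o, used) p).2.2 (pvB_step (pvB_build bigE) (z, o, nxt) p).2.2 := by
  obtain ⟨hk0, hdrop⟩ := hInv p.2
  set k := nxt.getD p.2 0 with hkdef
  set lst := (pvB_build bigE).getD p.2 [] with hlst
  have hscan := pvA_scan_eq used p.2 bigE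
  cases hrem : pvRem bigE used p.2 with
  | nil =>
    -- no available occurrence: A's scan fails, B's pointer is at/after the end
    have hlen : ¬ (k < PySem.List.len lst) := by
      rw [hrem] at hdrop
      have := List.drop_eq_nil_iff.mp hdrop
      simp only [PySem.List.len_eq]
      omega
    have hA : pvA_scan used p.2 bigE = none := by rw [hscan, hrem]; rfl
    refine ⟨?_, ?_, ?_⟩ <;> simp only [pvA_step, pvB_step, hA, ← hkdef, ← hlst, if_neg hlen]
    exact hInv
  | cons j rest =>
    -- A matches j, the head of the remaining occurrences; B reads lst[k] = j
    have hkn : k.toNat < lst.length := by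
      by_contra hge
      rw [List.drop_eq_nil_iff.mpr (by omega)] at hdrop
      simp [hrem] at hdrop
    have hlen : k < PySem.List.len lst := by simp only [PySem.List.len_eq]; omega
    have hA : pvA_scan used p.2 bigE = some j := by rw [hscan, hrem]; rfl
    have hget : PySem.List.pyGetD lst k 0 = j := by
      rw [PySem.List.pyGetD_eq_getElem lst 0 hk0 (by simpa using hlen)]
      have : lst[k.toNat] = (lst.drop k.toNat)[0]'(by simp [hrem, hdrop]) := by
        simp [List.getElem_drop]
      rw [this]
      simp [hdrop, hrem]
    have hlen' : k < (lst.length : Int) := by simpa using hlen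
    refine ⟨?_, ?_, ?_⟩
    · simp [pvA_step, pvB_step, hA, ← hkdef, ← hlst, hlen', hget]
    · simp [pvA_step, pvB_step, hA, ← hkdef, ← hlst, hlen']
    · simp only [pvA_step, pvB_step, hA, ← hkdef, ← hlst, if_pos hlen]
      intro c
      by_cases hc : c = p.2
      · subst hc
        constructor
        · rw [PySem.Dict.getD_insert_self]
          omega
        rw [PySem.Dict.getD_insert_self]
        have hdrop1 : lst.drop (k + 1).toNat = rest := by
          have : (k + 1).toNat = k.toNat + 1 := by omega
          rw [this, ← List.drop_drop, hdrop, hrem]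
          simp
        rw [← hlst, hdrop1, pvRem_add, hrem, List.filter_cons]
        have hjrest : j ∉ rest := by
          have := pvRem_nodup hn used p.2
          rw [hrem] at this
          exact (List.nodup_cons.mp this).1
        rw [if_neg (by simp)]
        refine (List.filter_eq_self.mpr ?_).symm
        intro x hx
        have hxj : x ≠ j := fun hxj => hjrest (hxj ▸ hx)
        simp [hxj]
      · obtain ⟨hk0', hdrop'⟩ := hInv c
        refine ⟨by rwa [PySem.Dict.getD_insert_of_ne _ _ _ hc], ?_⟩
        rw [PySem.Dict.getD_insert_of_ne _ _ _ hc, hdrop', pvRem_add]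
        refine (List.filter_eq_self.mpr ?_).symm
        intro x hx
        have hxj : x ≠ j := by
          intro hxj
          -- x = j lies in pvRem for c and for p.2 with c ≠ p.2: contradicts fst-nodup
          have hx' : j ∈ pvRem bigE used c := hxj ▸ hx
          obtain ⟨q, hq, hq2, _, hq1⟩ := mem_pvRem.mp hx'
          have hj : j ∈ pvRem bigE used p.2 := by simp [hrem]
          obtain ⟨r, hr, hr2, _, hr1⟩ := mem_pvRem.mp hj
          have : q = r := List.inj_on_of_nodup_map hn hq hr (by rw [hq1, hr1])
          exact hc (by rw [← hq2, this, hr2])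
        simp [hxj]

lemma pv_fold_sim (bigE : List (Int × Char)) (hn : (bigE.map (·.1)).Nodup) :
    ∀ (ps : List (Int × Char)) (z o : List Int) (used : PySem.Set Int) (nxt : PySem.Dict Char Int),
    pvInv bigE used nxt →
    (ps.foldl (pvA_step bigE) (z, o, used)).1 = (ps.foldl (pvB_step (pvB_build bigE)) (z, o, nxt)).1 ∧
    (ps.foldl (pvA_step bigE) (z, o, used)).2.1 = (ps.foldl (pvB_step (pvB_build bigE)) (z, o, nxt)).2.1 := by
  intro ps
  induction ps with
  | nil => intro z o used nxt _; exact ⟨rfl, rfl⟩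
  | cons p t ih =>
    intro z o used nxt hInv
    obtain ⟨h1, h2, hInv'⟩ := pv_step_sim bigE hn z o used nxt p hInv
    simp only [List.foldl_cons]
    have ha : pvA_step bigE (z, o, used) p
        = ((pvA_step bigE (z, o, used) p).1, (pvA_step bigE (z, o, used) p).2.1,
           (pvA_step bigE (z, o, used) p).2.2) := rfl
    have hb : pvB_step (pvB_build bigE) (z, o, nxt) p
        = ((pvA_step bigE (z, o, used) p).1, (pvA_step bigE (z, o, used) p).2.1,
           (pvB_step (pvB_build bigE) (z, o, nxt) p).2.2) := by
      rw [h1, h2]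
    rw [ha, hb]
    exact ih _ _ _ _ hInv'

lemma pv_enum_fst_nodup (l : List Char) : ((PySem.List.enumerate l).map (·.1)).Nodup := by
  have h := PySem.List.pairwise_lt_enumerate l (s := 0)
  exact (List.pairwise_map.mpr (h.imp (fun hlt => ne_of_lt hlt))).imp (fun h => h)

-- ===== VERDICT (by name: the statement is the Claim_ definition above) =====
theorem find_the_same_letters_spec : Claim_equal_find_the_same_letters := by
  intro word_one word_two _
  show find_the_same_letters word_one word_two = find_the_same_letters_alt word_one word_two
  simp only [find_the_same_letters, find_the_same_letters_alt, PySem.Str.len_eq, gt_iff_lt,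
    Nat.cast_lt]
  by_cases h : word_two.toList.length < word_one.toList.length <;>
    simp only [h, if_true, if_false] <;>
  · obtain ⟨h1, h2⟩ := pv_fold_sim _ (pv_enum_fst_nodup _) (PySem.List.enumerate _) [] []
      PySem.Set.empty PySem.Dict.empty (pvInv_init _)
    rw [h1, h2]
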